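-- pv_equiv track=rewrite | github.com/mbarakovskiy/integral_maker | main.py | split_to_summands
-- ===== SOURCE A (Python) =====
-- def split_to_summands(string):
--     summands = []
--     summand = ""
--     brackets_count = 0
--     for symb in string:
--         if symb == "(":
--             brackets_count += 1
--             summand += symb
--             continue
--         if symb == ")":
--             brackets_count -= 1
--             summand += symb
--             continue
--         if brackets_count == 0 and symb in "+-":
--             summands.append(summand)
--             if symb == "+":
--                 summand = ""
--             else:
--                 summand = "(-1)*"
--             continue
--         summand += symb
--     summands.append(summand)
--     return summands
-- ===== SOURCE B (Python) =====
-- def split_to_summands(string):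
--     depth = 0
--     for i, c in enumerate(string):
--         if c == '(':
--             depth += 1
--         elif c == ')':
--             depth -= 1
--         elif depth == 0 and c in '+-':
--             rest = split_to_summands(string[i + 1:])
--             if c == '-':
--                 rest[0] = '(-1)*' + rest[0]
--             return [string[:i]] + rest
--     return [string]
-- ===== Notes on version B (the rewrite author's own statement) =====
-- stated objective: alternative
-- what changed: B replaces A's single pass with a mutable accumulator string by a recursive descent: it finds the first top-level '+'/'-' operator, slices off the head segment, and recurses on the remainder, prefixing '(-1)*' when the operator was '-'.
import Mathlib
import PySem

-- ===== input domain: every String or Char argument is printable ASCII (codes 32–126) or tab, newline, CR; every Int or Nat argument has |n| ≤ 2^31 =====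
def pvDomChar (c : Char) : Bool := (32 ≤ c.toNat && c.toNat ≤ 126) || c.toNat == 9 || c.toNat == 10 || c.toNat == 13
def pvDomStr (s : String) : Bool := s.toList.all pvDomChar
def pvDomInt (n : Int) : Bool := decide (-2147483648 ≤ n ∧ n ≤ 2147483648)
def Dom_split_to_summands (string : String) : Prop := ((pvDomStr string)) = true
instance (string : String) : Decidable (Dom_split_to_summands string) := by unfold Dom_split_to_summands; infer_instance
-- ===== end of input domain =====

-- B re-implements the split as a recursive descent that finds the first top-level +/- and recurses
-- on the remainder, instead of A's single pass with a growing accumulator (objective: alternative).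


-- ===== PORT A =====
-- A's for-loop over the characters with state (summands, summand, brackets_count),
-- working on List Char (PySem.Chars style); the wrapper packs the segments back into Strings.
def pvLoopA : List Char → List (List Char) → List Char → Int → List (List Char)
  | [], summands, summand, _ => summands ++ [summand]
  | c :: t, summands, summand, bc =>
    if c = '(' then pvLoopA t summands (summand ++ [c]) (bc + 1)
    else if c = ')' then pvLoopA t summands (summand ++ [c]) (bc - 1)
    else if bc = 0 ∧ (c = '+' ∨ c = '-') then
      if c = '+' then pvLoopA t (summands ++ [summand]) [] bc
      else pvLoopA t (summands ++ [summand]) "(-1)*".toList bc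
    else pvLoopA t summands (summand ++ [c]) bc

def split_to_summands (string : String) : List String :=
  (pvLoopA string.toList [] [] 0).map String.mk

-- ===== PORT B =====
-- first phase of Source B's loop body: find the first top-level '+'/'-' (index and operator)
def pvFindOp : List Char → Int → Option (Nat × Char)
  | [], _ => none
  | c :: t, depth =>
    if c = '(' then (pvFindOp t (depth + 1)).map (fun p => (p.1 + 1, p.2))
    else if c = ')' then (pvFindOp t (depth - 1)).map (fun p => (p.1 + 1, p.2))
    else if depth = 0 ∧ (c = '+' ∨ c = '-') then some (0, c)
    else (pvFindOp t depth).map (fun p => (p.1 + 1, p.2))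

-- needed by pvSplitB's termination proof, so it stays above the claim block
theorem pvFindOp_lt : ∀ (l : List Char) (d : Int) (i : Nat) (c : Char),
    pvFindOp l d = some (i, c) → i < l.length := by
  intro l
  induction l with
  | nil => intro d i c h; simp [pvFindOp] at h
  | cons a t ih =>
    intro d i c h
    simp only [pvFindOp] at h
    split_ifs at h with h1 h2 h3
    · rcases Option.map_eq_some_iff.mp h with ⟨⟨j, x⟩, hj, he⟩
      cases he; have := ih _ _ _ hj; simpa using Nat.succ_lt_succ this
    · rcases Option.map_eq_some_iff.mp h with ⟨⟨j, x⟩, hj, he⟩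
      cases he; have := ih _ _ _ hj; simpa using Nat.succ_lt_succ this
    · cases h; simp
    · rcases Option.map_eq_some_iff.mp h with ⟨⟨j, x⟩, hj, he⟩
      cases he; have := ih _ _ _ hj; simpa using Nat.succ_lt_succ this

-- Source B's recursion: head slice, then recurse on the remainder; '-' prefixes the next segment
def pvSplitB (l : List Char) : List (List Char) :=
  match h : pvFindOp l 0 with
  | none => [l]
  | some (i, c) =>
    let rest := pvSplitB (l.drop (i + 1))
    (l.take i) ::
      (if c = '-' then rest.modifyHead (fun r => "(-1)*".toList ++ r) else rest)
termination_by l.length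
decreasing_by
  have := pvFindOp_lt l 0 i c h
  simp only [List.length_drop]; omega

def split_to_summands_alt (string : String) : List String :=
  (pvSplitB string.toList).map String.mk

-- ===== PRECONDITION & SPEC =====
def Spec_split_to_summands (string : String) (out : List String) : Prop := out = split_to_summands_alt string
instance (string : String) (out : List String) : Decidable (Spec_split_to_summands string out) := by unfold Spec_split_to_summands; infer_instance

-- ===== CLAIM (what is proved, stated in full; the proofs are below) =====
def Claim_equal_split_to_summands : Prop := ∀ (string : String), Dom_split_to_summands string → Spec_split_to_summands string (split_to_summands string)

-- ===== LEMMAS AND PROOFS =====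

-- the accumulator of A's loop factors out
theorem pvLoopA_acc : ∀ (l : List Char) (acc : List (List Char)) (cur : List Char) (d : Int),
    pvLoopA l acc cur d = acc ++ pvLoopA l [] cur d := by
  intro l
  induction l with
  | nil => intro acc cur d; simp [pvLoopA]
  | cons c t ih =>
    intro acc cur d
    simp only [pvLoopA]
    split_ifs with h1 h2 h3 h4 <;> rw [ih] <;> rw [ih] <;> simp <;>
      (conv_rhs => rw [ih]) <;> simp

-- the operator found by pvFindOp is '+' or '-'
theorem pvFindOp_op : ∀ (l : List Char) (d : Int) (i : Nat) (c : Char),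
    pvFindOp l d = some (i, c) → c = '+' ∨ c = '-' := by
  intro l
  induction l with
  | nil => intro d i c h; simp [pvFindOp] at h
  | cons a t ih =>
    intro d i c h
    simp only [pvFindOp] at h
    split_ifs at h with h1 h2 h3
    · rcases Option.map_eq_some_iff.mp h with ⟨⟨j, x⟩, hj, he⟩
      cases he; exact ih _ _ _ hj
    · rcases Option.map_eq_some_iff.mp h with ⟨⟨j, x⟩, hj, he⟩
      cases he; exact ih _ _ _ hj
    · cases h; exact h3.2
    · rcases Option.map_eq_some_iff.mp h with ⟨⟨j, x⟩, hj, he⟩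
      cases he; exact ih _ _ _ hj

-- when no top-level operator exists, the whole remainder becomes one segment
theorem pvLoopA_none : ∀ (l : List Char) (d : Int) (cur : List Char),
    pvFindOp l d = none → pvLoopA l [] cur d = [cur ++ l] := by
  intro l
  induction l with
  | nil => intro d cur _; simp [pvLoopA]
  | cons c t ih =>
    intro d cur h
    by_cases h1 : c = '('
    · simp only [pvFindOp, if_pos h1, Option.map_eq_none_iff] at h
      simp only [pvLoopA, if_pos h1]
      rw [ih _ _ h]; simp
    · by_cases h2 : c = ')'
      · simp only [pvFindOp, if_neg h1, if_pos h2, Option.map_eq_none_iff] at h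
        simp only [pvLoopA, if_neg h1, if_pos h2]
        rw [ih _ _ h]; simp
      · by_cases h3 : d = 0 ∧ (c = '+' ∨ c = '-')
        · simp only [pvFindOp, if_neg h1, if_neg h2, if_pos h3] at h
          exact absurd h (by simp)
        · simp only [pvFindOp, if_neg h1, if_neg h2, if_neg h3, Option.map_eq_none_iff] at h
          simp only [pvLoopA, if_neg h1, if_neg h2, if_neg h3]
          rw [ih _ _ h]; simp

-- the first top-level operator splits A's loop into the head segment and a fresh run at depth 0
theorem pvLoopA_some : ∀ (l : List Char) (d : Int) (cur : List Char) (i : Nat) (c : Char),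
    pvFindOp l d = some (i, c) →
    pvLoopA l [] cur d =
      (cur ++ l.take i) ::
        pvLoopA (l.drop (i + 1)) [] (if c = '+' then [] else "(-1)*".toList) 0 := by
  intro l
  induction l with
  | nil => intro d cur i c h; simp [pvFindOp] at h
  | cons a t ih =>
    intro d cur i c h
    by_cases h1 : a = '('
    · simp only [pvFindOp, if_pos h1] at h
      rcases Option.map_eq_some_iff.mp h with ⟨⟨j, x⟩, hj, he⟩
      obtain ⟨hi, hc⟩ : i = j + 1 ∧ c = x := by cases he; exact ⟨rfl, rfl⟩
      subst hi; subst hc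
      simp only [pvLoopA, if_pos h1]
      rw [ih _ _ _ _ hj]; simp
    · by_cases h2 : a = ')'
      · simp only [pvFindOp, if_neg h1, if_pos h2] at h
        rcases Option.map_eq_some_iff.mp h with ⟨⟨j, x⟩, hj, he⟩
        obtain ⟨hi, hc⟩ : i = j + 1 ∧ c = x := by cases he; exact ⟨rfl, rfl⟩
        subst hi; subst hc
        simp only [pvLoopA, if_neg h1, if_pos h2]
        rw [ih _ _ _ _ hj]; simp
      · by_cases h3 : d = 0 ∧ (a = '+' ∨ a = '-')
        · simp only [pvFindOp] at h
          rw [if_neg h1, if_neg h2, if_pos h3] at h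
          cases h
          have hd : d = 0 := h3.1
          subst hd
          simp only [pvLoopA]
          rw [if_neg h1, if_neg h2,
            if_pos (show True ∧ (a = '+' ∨ a = '-') from ⟨trivial, h3.2⟩)]
          by_cases hp : a = '+'
          · simp only [if_pos hp]
            rw [pvLoopA_acc]; simp
          · simp only [if_neg hp]
            rw [pvLoopA_acc]; simp
        · simp only [pvFindOp, if_neg h1, if_neg h2, if_neg h3] at h
          rcases Option.map_eq_some_iff.mp h with ⟨⟨j, x⟩, hj, he⟩
          obtain ⟨hi, hc⟩ : i = j + 1 ∧ c = x := by cases he; exact ⟨rfl, rfl⟩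
          subst hi; subst hc
          simp only [pvLoopA, if_neg h1, if_neg h2, if_neg h3]
          rw [ih _ _ _ _ hj]; simp

-- starting A's loop with a pre-filled current segment = prefixing the first result segment
theorem pvLoopA_prefix : ∀ (l : List Char) (d : Int) (p cur : List Char),
    pvLoopA l [] (p ++ cur) d = (pvLoopA l [] cur d).modifyHead (fun r => p ++ r) := by
  intro l
  induction l with
  | nil => intro d p cur; simp [pvLoopA]
  | cons c t ih =>
    intro d p cur
    simp only [pvLoopA]
    split_ifs with h1 h2 h3 h4
    · rw [List.append_assoc, ih]
    · rw [List.append_assoc, ih]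
    · rw [pvLoopA_acc, pvLoopA_acc t ([] ++ [cur])]; simp
    · rw [pvLoopA_acc, pvLoopA_acc t ([] ++ [cur])]; simp
    · rw [List.append_assoc, ih]

-- B's recursion computes exactly A's loop started fresh
theorem pvSplitB_eq_aux : ∀ (n : Nat) (l : List Char), l.length ≤ n →
    pvSplitB l = pvLoopA l [] [] 0 := by
  intro n
  induction n with
  | zero =>
    intro l hl
    have hnil : l = [] := List.length_eq_zero_iff.mp (Nat.le_zero.mp hl)
    subst hnil
    rw [pvSplitB]
    split
    · simp [pvLoopA]
    · next i c hf => exact absurd (pvFindOp_lt _ _ _ _ hf) (by simp)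
  | succ n ih =>
    intro l hl
    rw [pvSplitB]
    split
    · next hf => rw [pvLoopA_none l 0 [] hf]; simp
    · next i c hf =>
      have hlt := pvFindOp_lt l 0 i c hf
      have hdrop : (l.drop (i + 1)).length ≤ n := by
        simp only [List.length_drop]; omega
      rw [pvLoopA_some l 0 [] i c hf, ih _ hdrop]
      rcases pvFindOp_op l 0 i c hf with hp | hm
      · subst hp; simp
      · subst hm
        have hpre := pvLoopA_prefix (l.drop (i + 1)) 0 "(-1)*".toList []
        simp only [List.append_nil] at hpre
        simp
        simpa using hpre.symm

theorem pvSplitB_eq (l : List Char) : pvSplitB l = pvLoopA l [] [] 0 :=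
  pvSplitB_eq_aux l.length l le_rfl

-- ===== VERDICT (by name: the statement is the Claim_ definition above) =====
theorem split_to_summands_spec : Claim_equal_split_to_summands := by
  intro s _
  unfold Spec_split_to_summands split_to_summands split_to_summands_alt
  rw [pvSplitB_eq]
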